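-- pv_equiv track=rewrite | github.com/cs-cordero/advent-of-code | py/2019/day03/day03.py | get_visited_points
-- ===== SOURCE A (Python) =====
-- from typing import Dict, List, Tuple
--
-- def get_visited_points(movements: List[Tuple[str, int]]) -> Dict[Tuple[int, int], int]:
--     visited = {}
--     direction_map = {"U": (-1, 0), "D": (1, 0), "R": (0, 1), "L": (0, -1)}
--     x, y = (0, 0)
--     steps = 0
--     for direction, movement in movements:
--         dx, dy = direction_map[direction]
--         for _ in range(movement):
--             steps += 1
--             x += dx
--             y += dy
--             visited.setdefault((x, y), steps)
--     return visited
-- ===== SOURCE B (Python) =====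
-- def get_visited_points(movements):
--     deltas = {"U": (-1, 0), "D": (1, 0), "R": (0, 1), "L": (0, -1)}
--     path = []
--     x, y = 0, 0
--     for direction, movement in movements:
--         dx, dy = deltas[direction]
--         seg = [(x + i * dx, y + i * dy) for i in range(1, movement + 1)]
--         path += seg
--         if seg:
--             x, y = seg[-1]
--     visited = {}
--     for steps, p in enumerate(path, 1):
--         visited.setdefault(p, steps)
--     return visited
-- ===== Notes on version B (the rewrite author's own statement) =====
-- stated objective: alternative
-- what changed: B replaces A's interleaved per-unit-step state machine by two staged passes: each segment's coordinates are produced in closed form via a range comprehension (x+i*dx for i in 1..m) with the cursor jumped to the segment's last point, and first-visit step counts are then assigned in a separate enumerate(path, 1)/setdefault pass.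
import Mathlib
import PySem

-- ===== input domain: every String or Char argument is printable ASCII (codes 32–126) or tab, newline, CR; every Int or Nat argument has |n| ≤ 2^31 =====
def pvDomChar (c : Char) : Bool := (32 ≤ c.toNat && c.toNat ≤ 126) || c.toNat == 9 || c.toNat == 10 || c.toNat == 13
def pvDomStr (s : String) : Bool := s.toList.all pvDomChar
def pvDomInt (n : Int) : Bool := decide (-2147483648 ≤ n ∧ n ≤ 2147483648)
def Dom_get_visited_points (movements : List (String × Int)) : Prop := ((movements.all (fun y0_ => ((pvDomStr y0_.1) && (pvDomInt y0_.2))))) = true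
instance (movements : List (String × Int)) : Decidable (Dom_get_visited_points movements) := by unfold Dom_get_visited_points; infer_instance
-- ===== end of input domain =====

-- B stages the computation: each segment's coordinates come from a closed-form range
-- comprehension (no per-unit stepping of the cursor), and first-visit step counts are
-- assigned in a separate enumerate/setdefault pass; same cost, different decomposition.
-- Equal on all inputs where A does not raise KeyError (direction not in the map).

-- ===== PORT A =====
-- direction_map[direction]: exact on Pre_ (any other key raises KeyError in Python, excluded by Pre_)
def pvDirOf (d : String) : Int × Int :=
  if d = "U" then (-1, 0) else if d = "D" then (1, 0)
  else if d = "R" then (0, 1) else (0, -1)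

-- inner 'for _ in range(movement)' of A: state (visited, x, y, steps)
def pvAInner (dx dy : Int) :
    Nat → (PySem.Dict (Int × Int) Int × Int × Int × Int) → (PySem.Dict (Int × Int) Int × Int × Int × Int)
  | 0, st => st
  | Nat.succ n, (v, x, y, s) =>
      pvAInner dx dy n (PySem.Dict.setdefault v (x + dx, y + dy) (s + 1), x + dx, y + dy, s + 1)

-- outer 'for direction, movement in movements' of A
def pvALoop :
    List (String × Int) → (PySem.Dict (Int × Int) Int × Int × Int × Int) → (PySem.Dict (Int × Int) Int × Int × Int × Int)
  | [], st => st
  | (d, m) :: rest, st =>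
      let (dx, dy) := pvDirOf d
      pvALoop rest (pvAInner dx dy m.toNat st)

def get_visited_points (movements : List (String × Int)) : List (Int × Int × Int) :=
  ((pvALoop movements (PySem.Dict.empty, 0, 0, 0)).1).items.map (fun pv => (pv.1.1, pv.1.2, pv.2))

-- ===== PORT B =====
-- deltas literal dict; lookup exact on Pre_ (KeyError otherwise, excluded)
def pvDeltas : PySem.Dict String (Int × Int) :=
  PySem.Dict.ofList [("U", (-1, 0)), ("D", (1, 0)), ("R", (0, 1)), ("L", (0, -1))]

-- loop body of B's first pass: closed-form segment comprehension, cursor jumps to seg[-1]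
def pvBStep (st : List (Int × Int) × Int × Int) (dm : String × Int) :
    List (Int × Int) × Int × Int :=
  let dxy := (pvDeltas.get? dm.1).getD (0, 0)
  let seg := (PySem.List.pyRange 1 (dm.2 + 1) 1).map
    (fun i => (st.2.1 + i * dxy.1, st.2.2 + i * dxy.2))
  let xy := seg.getLast?.getD (st.2.1, st.2.2)
  (st.1 ++ seg, xy.1, xy.2)

def get_visited_points_alt (movements : List (String × Int)) : List (Int × Int × Int) :=
  -- first pass: build the whole trajectory
  let st := movements.foldl pvBStep ([], 0, 0)
  -- second pass: 'for steps, p in enumerate(path, 1): visited.setdefault(p, steps)'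
  let visited := (PySem.List.enumerate st.1 1).foldl
    (fun v sp => PySem.Dict.setdefault v sp.2 sp.1) PySem.Dict.empty
  visited.items.map (fun pv => (pv.1.1, pv.1.2, pv.2))

-- ===== PRECONDITION & SPEC =====
-- Pre_ excludes exactly the inputs where Python A (and B alike) raises KeyError: a
-- direction string outside {"U","D","R","L"}.
def Pre_get_visited_points (movements : List (String × Int)) : Prop :=
  ∀ p ∈ movements, p.1 = "U" ∨ p.1 = "D" ∨ p.1 = "R" ∨ p.1 = "L"
instance (movements : List (String × Int)) : Decidable (Pre_get_visited_points movements) := by unfold Pre_get_visited_points; infer_instance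

def pvWitness_get_visited_points : (List (String × Int)) := [("R", 3), ("U", 2), ("L", 1)]

def Spec_get_visited_points (movements : List (String × Int)) (out : List (Int × Int × Int)) : Prop := out = get_visited_points_alt movements
instance (movements : List (String × Int)) (out : List (Int × Int × Int)) : Decidable (Spec_get_visited_points movements out) := by unfold Spec_get_visited_points; infer_instance

-- ===== CLAIM (what is proved, stated in full; the proofs are below) =====
def Claim_equal_get_visited_points : Prop := ∀ (movements : List (String × Int)), Dom_get_visited_points movements → Pre_get_visited_points movements → Spec_get_visited_points movements (get_visited_points movements)

-- ===== LEMMAS AND PROOFS =====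

-- the coordinates visited by one segment of n unit moves (dx, dy) starting at (x, y)
def pvSeg (dx dy : Int) : Nat → Int → Int → List (Int × Int)
  | 0, _, _ => []
  | Nat.succ n, x, y => (x + dx, y + dy) :: pvSeg dx dy n (x + dx) (y + dy)

-- the whole trajectory of the movement list starting at (x, y)
def pvPath : List (String × Int) → Int → Int → List (Int × Int)
  | [], _, _ => []
  | (d, m) :: rest, x, y =>
      let (dx, dy) := pvDirOf d
      pvSeg dx dy m.toNat x y ++ pvPath rest (x + m.toNat * dx) (y + m.toNat * dy)

-- A's interleaved visited/steps pass, as a function of the path alone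
def pvVFrom (v : PySem.Dict (Int × Int) Int) (s : Int) : List (Int × Int) → PySem.Dict (Int × Int) Int
  | [] => v
  | p :: ps => pvVFrom (PySem.Dict.setdefault v p (s + 1)) (s + 1) ps

theorem pvSeg_length (dx dy : Int) : ∀ (n : Nat) (x y : Int), (pvSeg dx dy n x y).length = n := by
  intro n; induction n with
  | zero => intro x y; rfl
  | succ n ih => intro x y; simp [pvSeg, ih]

theorem pvVFrom_append (p : List (Int × Int)) : ∀ (v : PySem.Dict (Int × Int) Int) (s : Int) (q : List (Int × Int)),
    pvVFrom v s (p ++ q) = pvVFrom (pvVFrom v s p) (s + p.length) q := by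
  induction p with
  | nil => intro v s q; simp [pvVFrom]
  | cons a p ih => intro v s q; simp [pvVFrom, ih]; ring_nf

theorem pvAInner_eq (dx dy : Int) : ∀ (n : Nat) (v : PySem.Dict (Int × Int) Int) (x y s : Int),
    pvAInner dx dy n (v, x, y, s) = (pvVFrom v s (pvSeg dx dy n x y), x + n * dx, y + n * dy, s + n) := by
  intro n; induction n with
  | zero => intro v x y s; simp [pvAInner, pvSeg, pvVFrom]
  | succ n ih =>
      intro v x y s
      simp only [pvAInner, pvSeg, pvVFrom, ih, Prod.mk.injEq]
      refine ⟨trivial, by push_cast; ring, by push_cast; ring, by push_cast; ring⟩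

theorem pvALoop_eq (ms : List (String × Int)) : ∀ (v : PySem.Dict (Int × Int) Int) (x y s : Int),
    (pvALoop ms (v, x, y, s)).1 = pvVFrom v s (pvPath ms x y) := by
  induction ms with
  | nil => intro v x y s; simp [pvALoop, pvPath, pvVFrom]
  | cons hd rest ih =>
      intro v x y s
      obtain ⟨d, m⟩ := hd
      simp only [pvALoop, pvAInner_eq, ih, pvPath]
      rw [pvVFrom_append]
      simp [pvSeg_length]

-- B's closed-form comprehension over range(1, m+1) IS the segment list
theorem pvSeg_eq_range_map (dx dy : Int) : ∀ (n : Nat) (x y : Int),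
    pvSeg dx dy n x y = (List.range n).map (fun (k : Nat) => (x + (1 + (k : Int)) * dx, y + (1 + (k : Int)) * dy)) := by
  intro n; induction n with
  | zero => intro x y; simp [pvSeg]
  | succ n ih =>
      intro x y
      rw [List.range_succ_eq_map, List.map_cons, List.map_map]
      simp only [pvSeg, ih]
      congr 1
      · simp only [Nat.cast_zero, Prod.mk.injEq]
        constructor <;> ring
      · apply List.map_congr_left; intro k _
        simp only [Function.comp_apply, Prod.mk.injEq]
        constructor <;> (push_cast; ring)

theorem pvSegB_eq (dx dy m x y : Int) :
    (PySem.List.pyRange 1 (m + 1) 1).map (fun i => (x + i * dx, y + i * dy)) = pvSeg dx dy m.toNat x y := by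
  rw [PySem.List.pyRange_one, pvSeg_eq_range_map, List.map_map]
  have : (m + 1 - 1).toNat = m.toNat := by omega
  rw [this]
  apply List.map_congr_left; intro k _
  simp only [Function.comp_apply]

theorem pvSeg_getLast (dx dy : Int) : ∀ (n : Nat) (x y : Int),
    (pvSeg dx dy n x y).getLast?.getD (x, y) = (x + n * dx, y + n * dy) := by
  intro n; induction n with
  | zero => intro x y; simp [pvSeg]
  | succ n ih =>
      intro x y
      have hne : pvSeg dx dy (n + 1) x y = (x + dx, y + dy) :: pvSeg dx dy n (x + dx) (y + dy) := rfl
      rw [hne, List.getLast?_cons]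
      cases hn : pvSeg dx dy n (x + dx) (y + dy) with
      | nil =>
          have : n = 0 := by have := pvSeg_length dx dy n (x + dx) (y + dy); rw [hn] at this; simpa using this.symm
          subst this
          simp only [List.getLast?_nil, Option.getD_none, Option.getD_some, Prod.mk.injEq]
          constructor <;> (push_cast; ring)
      | cons a l =>
          have := ih (x + dx) (y + dy)
          rw [hn] at this
          simp only [List.getLast?_cons] at this ⊢
          simp only [Option.getD_some] at this ⊢
          rw [this]
          simp only [Prod.mk.injEq]
          constructor <;> (push_cast; ring)

-- pvDeltas lookup agrees with pvDirOf on the four legal keys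
theorem pvDeltas_eq (d : String) (h : d = "U" ∨ d = "D" ∨ d = "R" ∨ d = "L") :
    (pvDeltas.get? d).getD (0, 0) = pvDirOf d := by
  rcases h with h | h | h | h <;> subst h <;> decide

-- B's first pass builds exactly the trajectory
theorem pvBFold_eq (ms : List (String × Int)) : ∀ (path : List (Int × Int)) (x y : Int),
    (∀ p ∈ ms, p.1 = "U" ∨ p.1 = "D" ∨ p.1 = "R" ∨ p.1 = "L") →
    (ms.foldl pvBStep (path, x, y)).1 = path ++ pvPath ms x y := by
  induction ms with
  | nil => intro path x y _; simp [pvPath]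
  | cons hd rest ih =>
      intro path x y hpre
      obtain ⟨d, m⟩ := hd
      have hd4 := hpre (d, m) (by simp)
      have hstep : pvBStep (path, x, y) (d, m)
          = (path ++ pvSeg (pvDirOf d).1 (pvDirOf d).2 m.toNat x y,
             x + m.toNat * (pvDirOf d).1, y + m.toNat * (pvDirOf d).2) := by
        simp only [pvBStep, pvDeltas_eq d hd4, pvSegB_eq, pvSeg_getLast]
      rw [List.foldl_cons, hstep, ih _ _ _ (fun p hp => hpre p (List.mem_cons_of_mem _ hp))]
      simp only [pvPath, List.append_assoc]

-- B's second pass over enumerate(path, 1) IS A's interleaved visited pass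
theorem pvBVisitFold_eq (p : List (Int × Int)) : ∀ (v : PySem.Dict (Int × Int) Int) (s : Int),
    (PySem.List.enumerate p (s + 1)).foldl
      (fun v sp => PySem.Dict.setdefault v sp.2 sp.1) v = pvVFrom v s p := by
  induction p with
  | nil => intro v s; simp [PySem.List.enumerate_nil, pvVFrom]
  | cons a p ih => intro v s; rw [PySem.List.enumerate_cons]; simp only [List.foldl_cons, pvVFrom]; exact ih _ _

-- ===== VERDICT (by name: the statement is the Claim_ definition above) =====
theorem get_visited_points_spec : Claim_equal_get_visited_points := by
  intro ms _ hpre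
  show _ = _
  simp only [get_visited_points, get_visited_points_alt]
  rw [pvALoop_eq, pvBFold_eq ms [] 0 0 hpre]
  simp only [List.nil_append]
  rw [show (1 : Int) = 0 + 1 from rfl, pvBVisitFold_eq]
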